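-- pv_equiv track=rewrite | github.com/Radhika74/python | files/equal_to_k.py | Operations
-- ===== SOURCE A (Python) =====
-- def Operations(nums, k):
--     st = set()
--     for x in nums:
--         if x < k:
--             return -1
--         elif x > k:
--             st.add(x)
--     return len(st)
-- ===== SOURCE B (Python) =====
-- def Operations(nums, k):
--     s = sorted(nums)
--     if s and s[0] < k:
--         return -1
--     count = 0
--     prev = None
--     for x in s:
--         if x > k and x != prev:
--             count += 1
--         prev = x
--     return count
-- ===== Notes on version B (the rewrite author's own statement) =====
-- stated objective: alternative
-- what changed: Replaced the hash-set early-exit loop by a sort-based algorithm: sort the list, detect a below-k element by inspecting the sorted head (the minimum), and count distinct above-k values by an adjacent x != prev scan over the sorted list, using no set at all.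
import Mathlib
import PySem

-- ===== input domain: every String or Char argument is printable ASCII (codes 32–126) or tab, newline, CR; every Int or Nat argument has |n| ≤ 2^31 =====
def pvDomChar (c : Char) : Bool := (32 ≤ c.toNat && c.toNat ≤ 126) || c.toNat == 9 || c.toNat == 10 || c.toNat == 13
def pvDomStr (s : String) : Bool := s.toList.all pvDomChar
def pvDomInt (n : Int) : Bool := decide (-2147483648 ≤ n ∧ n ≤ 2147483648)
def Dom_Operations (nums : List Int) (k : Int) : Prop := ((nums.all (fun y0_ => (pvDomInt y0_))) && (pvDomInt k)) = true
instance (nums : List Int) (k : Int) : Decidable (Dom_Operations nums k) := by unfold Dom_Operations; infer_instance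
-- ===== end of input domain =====

-- B replaces A's hash-set early-exit loop by a sort-based algorithm (sorted head = minimum check,
-- adjacent x != prev scan for the distinct above-k count); objective: alternative.

-- ===== PORT A =====
-- A's for-loop with its early return, carrying the set st
def OperationsLoop (k : Int) : List Int → PySem.Set Int → Int
  | [], st => (PySem.Set.len st : Int)
  | x :: xs, st =>
    if x < k then -1
    else if x > k then OperationsLoop k xs (PySem.Set.add st x)
    else OperationsLoop k xs st

def Operations (nums : List Int) (k : Int) : Int :=
  OperationsLoop k nums PySem.Set.empty

-- ===== PORT B =====
-- B's for-loop over the sorted list, carrying prev (None at first) and the count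
def OpsAltLoop (k : Int) : List Int → Option Int → Int → Int
  | [], _, count => count
  | x :: xs, prev, count =>
      OpsAltLoop k xs (some x) (if x > k ∧ prev ≠ some x then count + 1 else count)

def Operations_alt (nums : List Int) (k : Int) : Int :=
  let s := PySem.List.sorted nums (fun x => x) false
  if (match s with | [] => false | h :: _ => decide (h < k)) then -1
  else OpsAltLoop k s none 0

-- ===== PRECONDITION & SPEC =====
def Spec_Operations (nums : List Int) (k : Int) (out : Int) : Prop := out = Operations_alt nums k
instance (nums : List Int) (k : Int) (out : Int) : Decidable (Spec_Operations nums k out) := by unfold Spec_Operations; infer_instance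

-- ===== CLAIM (what is proved, stated in full; the proofs are below) =====
def Claim_equal_Operations : Prop := ∀ (nums : List Int) (k : Int), Dom_Operations nums k → Spec_Operations nums k (Operations nums k)

-- ===== LEMMAS AND PROOFS =====

-- two nodup lists with the same members have the same length
theorem len_eq_of_nodup_mem {l₁ l₂ : List Int} (h₁ : l₁.Nodup) (h₂ : l₂.Nodup)
    (h : ∀ y, y ∈ l₁ ↔ y ∈ l₂) : l₁.length = l₂.length :=
  ((List.perm_ext_iff_of_nodup h₁ h₂).mpr h).length_eq

-- A's loop closed form: early -1, else the number of distinct above-k elements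
theorem OperationsLoop_eq (k : Int) (xs : List Int) : ∀ (st : PySem.Set Int),
    OperationsLoop k xs st =
      if xs.any (fun x => decide (x < k)) then -1
      else (PySem.Set.len ((xs.filter (fun x => decide (x > k))).foldl PySem.Set.add st) : Int) := by
  induction xs with
  | nil => intro st; simp [OperationsLoop]
  | cons x xs ih =>
    intro st
    simp only [OperationsLoop, List.any_cons, List.filter_cons]
    by_cases h1 : x < k
    · simp [h1]
    · have h1' : decide (x < k) = false := by simp [h1]
      rw [if_neg h1, h1']
      by_cases h2 : x > k
      · rw [if_pos h2, ih]
        simp [h2]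
      · have h2' : decide (x > k) = false := by simp [h2]
        rw [if_neg h2, ih]
        simp [h2']

-- on a nonempty sorted list, "head < k" is exactly "some element is below k"
theorem head_lt_any (k h : Int) (t : List Int) (hle : ∀ y ∈ t, h ≤ y) :
    decide (h < k) = (h :: t).any (fun x => decide (x < k)) := by
  simp only [List.any_cons]
  by_cases hh : h < k
  · simp [hh]
  · have hta : t.any (fun x => decide (x < k)) = false := by
      simp only [List.any_eq_false]
      intro y hy
      simpa using le_trans (not_lt.mp hh) (hle y hy)
    simp [decide_eq_false hh, hta]

-- B's scan over a sorted list counts the distinct above-k elements not blocked by prev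
theorem OpsAltLoop_eq (k : Int) (s : List Int) :
    ∀ (p : Option Int) (c : Int), s.Pairwise (fun a b => a ≤ b) →
    (∀ p0, p = some p0 → ∀ y ∈ s, p0 ≤ y) →
    OpsAltLoop k s p c =
      c + (((PySem.Set.ofList (s.filter (fun x => decide (x > k)))).filter
              (fun y => decide (p ≠ some y))).length : Int) := by
  induction s with
  | nil => intro p c _ _; simp [OpsAltLoop]
  | cons x xs ih =>
    intro p c hs hp
    rcases List.pairwise_cons.mp hs with ⟨hle, hxs⟩
    have hp' : ∀ p0, (some x : Option Int) = some p0 → ∀ y ∈ xs, p0 ≤ y := by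
      intro p0 hp0 y hy
      cases hp0; exact hle y hy
    have hrmem : ∀ y ∈ xs.filter (fun x => decide (x > k)), x ≤ y ∧ k < y := by
      intro y hy
      rcases List.mem_filter.mp hy with ⟨hy1, hy2⟩
      exact ⟨hle y hy1, by simpa using hy2⟩
    simp only [OpsAltLoop]
    rw [ih (some x) _ hxs hp']
    by_cases h2 : x > k
    · have hf : (x :: xs).filter (fun x => decide (x > k))
              = x :: xs.filter (fun x => decide (x > k)) := by simp [h2]
      rw [hf, PySem.Set.ofList_cons]
      by_cases hpx : p = some x
      · -- prev equals x: x is not counted, and it is filtered out on both sides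
        have hcond : ¬ (x > k ∧ p ≠ some x) := by simp [hpx]
        rw [if_neg hcond]
        subst hpx
        have hL : ((PySem.Set.ofList (xs.filter (fun x => decide (x > k)))).filter
                    (fun y => decide ((some x : Option Int) ≠ some y))).length
                = ((x :: PySem.Set.discard (PySem.Set.ofList (xs.filter (fun x => decide (x > k)))) x).filter
                    (fun y => decide ((some x : Option Int) ≠ some y))).length := by
          apply len_eq_of_nodup_mem
          · exact (PySem.Set.nodup_ofList _).filter _
          · exact ((List.nodup_cons.mpr ⟨by simp [PySem.Set.mem_discard],
              PySem.Set.nodup_discard _ _ (PySem.Set.nodup_ofList _)⟩).filter _)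
          · intro y
            simp only [List.mem_filter, List.mem_cons, PySem.Set.mem_discard, decide_eq_true_eq]
            constructor
            · rintro ⟨hy, hne⟩
              exact ⟨Or.inr ⟨hy, fun h => hne (by rw [h])⟩, hne⟩
            · rintro ⟨hy, hne⟩
              rcases hy with rfl | ⟨hy, _⟩
              · exact absurd rfl hne
              · exact ⟨hy, hne⟩
        rw [hL]
      · -- x is counted once; prev blocks nothing among the remaining (all ≥ x > prev)
        have hcond : (x > k ∧ p ≠ some x) := ⟨h2, hpx⟩
        rw [if_pos hcond]
        have hfilter_cons :
            ((x :: PySem.Set.discard (PySem.Set.ofList (xs.filter (fun x => decide (x > k)))) x).filter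
              (fun y => decide (p ≠ some y)))
            = x :: ((PySem.Set.discard (PySem.Set.ofList (xs.filter (fun x => decide (x > k)))) x).filter
              (fun y => decide (p ≠ some y))) := by
          rw [List.filter_cons, if_pos (by simpa using hpx)]
        rw [hfilter_cons]
        have hR : ((PySem.Set.ofList (xs.filter (fun x => decide (x > k)))).filter
                    (fun y => decide ((some x : Option Int) ≠ some y))).length
                = ((PySem.Set.discard (PySem.Set.ofList (xs.filter (fun x => decide (x > k)))) x).filter
                    (fun y => decide (p ≠ some y))).length := by
          have hpfree : ∀ y ∈ PySem.Set.discard (PySem.Set.ofList (xs.filter (fun x => decide (x > k)))) x,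
              p ≠ some y := by
            intro y hy hpy
            rcases (PySem.Set.mem_discard _ _ _).mp hy with ⟨hy1, hy2⟩
            rcases hrmem y ((PySem.Set.mem_ofList _ _).mp hy1) with ⟨hxy, _⟩
            have hyx : y ≤ x := hp y hpy x List.mem_cons_self
            exact hy2 (le_antisymm hyx hxy)
          apply len_eq_of_nodup_mem
          · exact (PySem.Set.nodup_ofList _).filter _
          · exact (PySem.Set.nodup_discard _ _ (PySem.Set.nodup_ofList _)).filter _
          · intro y
            simp only [List.mem_filter, PySem.Set.mem_discard, decide_eq_true_eq]
            constructor
            · rintro ⟨hy, hne⟩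
              have hyx : y ≠ x := fun h => hne (by rw [h])
              exact ⟨⟨hy, hyx⟩, hpfree y ((PySem.Set.mem_discard _ _ _).mpr ⟨hy, hyx⟩)⟩
            · rintro ⟨⟨hy, hyx⟩, _⟩
              exact ⟨hy, fun h => hyx (Option.some.inj h).symm⟩
        rw [hR]
        simp only [List.length_cons]
        push_cast
        ring
    · -- x ≤ k: x is neither counted nor in the filtered list; neither prev can block anything
      have hcond : ¬ (x > k ∧ p ≠ some x) := fun h => h2 h.1
      have hf : (x :: xs).filter (fun x => decide (x > k))
              = xs.filter (fun x => decide (x > k)) := by simp [h2]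
      rw [if_neg hcond, hf]
      have habove : ∀ y ∈ PySem.Set.ofList (xs.filter (fun x => decide (x > k))), x < y := by
        intro y hy
        have := hrmem y ((PySem.Set.mem_ofList _ _).mp hy)
        exact lt_of_le_of_lt (not_lt.mp h2) this.2
      have hLfree : ∀ y ∈ PySem.Set.ofList (xs.filter (fun x => decide (x > k))),
          (some x : Option Int) ≠ some y := by
        intro y hy h
        exact absurd (Option.some.inj h) (ne_of_lt (habove y hy))
      have hRfree : ∀ y ∈ PySem.Set.ofList (xs.filter (fun x => decide (x > k))), p ≠ some y := by
        intro y hy hpy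
        have hpx := hp y hpy x List.mem_cons_self
        exact absurd (habove y hy) (not_lt.mpr hpx)
      rw [List.filter_eq_self.mpr (fun y hy => decide_eq_true (hLfree y hy)),
          List.filter_eq_self.mpr (fun y hy => decide_eq_true (hRfree y hy))]

-- any over a permutation
theorem any_perm {l₁ l₂ : List Int} (h : l₁.Perm l₂) (f : Int → Bool) : l₁.any f = l₂.any f := by
  cases hb : l₂.any f
  · simp only [List.any_eq_false] at hb ⊢
    exact fun y hy => hb y (h.mem_iff.mp hy)
  · simp only [List.any_eq_true] at hb ⊢
    rcases hb with ⟨y, hy, hfy⟩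
    exact ⟨y, h.mem_iff.mpr hy, hfy⟩

-- ===== VERDICT (by name: the statement is the Claim_ definition above) =====
theorem Operations_spec : Claim_equal_Operations := by
  intro nums k _
  unfold Spec_Operations Operations Operations_alt
  rw [OperationsLoop_eq]
  have hperm := PySem.List.sorted_perm nums (fun x => x) false
  have hpair := PySem.List.sorted_pairwise nums (fun x => x)
  simp only
  rw [← any_perm hperm (fun x => decide (x < k))]
  generalize hg : PySem.List.sorted nums (fun x => x) false = s at hperm hpair ⊢
  have hlen : (PySem.Set.ofList (s.filter (fun x => decide (x > k)))).length
            = ((nums.filter (fun x => decide (x > k))).foldl PySem.Set.add PySem.Set.empty).length := by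
    rw [show (nums.filter (fun x => decide (x > k))).foldl PySem.Set.add PySem.Set.empty
          = PySem.Set.ofList (nums.filter (fun x => decide (x > k))) from rfl]
    apply len_eq_of_nodup_mem (PySem.Set.nodup_ofList _) (PySem.Set.nodup_ofList _)
    intro y
    rw [PySem.Set.mem_ofList, PySem.Set.mem_ofList]
    exact (hperm.filter _).mem_iff
  cases s with
  | nil =>
    have : nums = [] := hperm.symm.eq_nil
    subst this
    simp [OpsAltLoop, PySem.Set.len, PySem.Set.empty]
  | cons h t =>
    rcases List.pairwise_cons.mp hpair with ⟨hle, _⟩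
    rw [show (match h :: t with | [] => false | h :: _ => decide (h < k))
          = decide (h < k) from rfl,
        head_lt_any k h t hle]
    by_cases hany : (h :: t).any (fun x => decide (x < k))
    · simp [hany]
    · rw [if_neg (by simpa using hany), if_neg (by simpa using hany),
          OpsAltLoop_eq k _ none 0 hpair (by intro p0 hh; cases hh)]
      rw [show (fun y : Int => decide ((none : Option Int) ≠ some y)) = fun _ => true from
            by funext y; simp, List.filter_true, zero_add]
      simp only [PySem.Set.len]
      exact_mod_cast hlen.symm
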